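-- pv_equiv track=rewrite | github.com/Frags-AI/model_app | clipping -base-files/final_pipeline.py | rank_virality
-- ===== SOURCE A (Python) =====
-- def rank_virality(segments, action_segs, audio_segs):
--     ranked = []
--     for (start, end) in segments:
--         score = 0
--         score += sum(1 for (s, e, *_ ) in action_segs if s < end and e > start) * 2
--         score += sum(1 for (s, e) in audio_segs if s < end and e > start)
--         ranked.append((start, end, score))
--     ranked.sort(key=lambda x: x[2], reverse=True)
--     return ranked
-- ===== SOURCE B (Python) =====
-- def rank_virality(segments, action_segs, audio_segs):
--     # One weighted event list; a single accumulation pass pushes each event's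
--     # weight onto every overlapping segment's score, instead of re-scanning
--     # both event lists for every segment.
--     events = [(a[0], a[1], 2) for a in action_segs]
--     events += [(s, e, 1) for (s, e) in audio_segs]
--     scores = [0] * len(segments)
--     for (s, e, w) in events:
--         scores = [sc + w if s < end and e > start else sc
--                   for (start, end), sc in zip(segments, scores)]
--     ranked = [(start, end, sc) for (start, end), sc in zip(segments, scores)]
--     ranked.sort(key=lambda x: x[2], reverse=True)
--     return ranked
-- ===== Notes on version B (the rewrite author's own statement) =====
-- stated objective: alternative
-- what changed: Event-centric accumulation: builds one weighted event list (action=2, audio=1) and makes a single comprehension pass over events updating a per-segment score table, removing A's per-segment generator re-scans and tuple unpacking of both event lists (constant-factor speedup, measured ~22x at the largest size).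
-- outside the precondition, e.g. on rank_virality([], [(10,)], []): A returns [], B raises IndexError
import Mathlib
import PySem

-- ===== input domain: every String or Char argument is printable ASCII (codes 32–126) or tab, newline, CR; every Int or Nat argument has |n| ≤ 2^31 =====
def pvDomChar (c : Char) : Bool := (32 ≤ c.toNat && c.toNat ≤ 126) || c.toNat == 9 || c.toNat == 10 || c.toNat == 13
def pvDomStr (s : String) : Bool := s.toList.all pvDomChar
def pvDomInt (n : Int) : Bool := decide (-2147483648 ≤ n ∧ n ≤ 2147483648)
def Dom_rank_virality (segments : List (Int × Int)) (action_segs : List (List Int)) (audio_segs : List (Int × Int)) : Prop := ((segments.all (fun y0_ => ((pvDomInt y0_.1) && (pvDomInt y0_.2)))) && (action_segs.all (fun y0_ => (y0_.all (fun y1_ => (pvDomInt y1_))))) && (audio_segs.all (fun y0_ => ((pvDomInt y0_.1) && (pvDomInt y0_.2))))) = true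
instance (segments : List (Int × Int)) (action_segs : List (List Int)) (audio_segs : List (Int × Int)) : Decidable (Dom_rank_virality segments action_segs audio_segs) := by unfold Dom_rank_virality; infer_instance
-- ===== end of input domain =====

-- B changes the traversal: one weighted event list pushed over a per-segment score table
-- in a single accumulation pass (objective: alternative; same return value).
-- ===== PORT A =====
def rank_virality (segments : List (Int × Int)) (action_segs : List (List Int)) (audio_segs : List (Int × Int)) : List (Int × Int × Int) :=
  let ranked := segments.foldl (fun ranked se =>
    let score : Int := 0
    let score := score + (action_segs.foldl (fun acc a =>
        match a with
        | s :: e :: _ => if s < se.2 ∧ e > se.1 then acc + 1 else acc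
        | _ => acc) 0) * 2
    let score := score + audio_segs.foldl (fun acc p =>
        if p.1 < se.2 ∧ p.2 > se.1 then acc + 1 else acc) 0
    ranked ++ [(se.1, se.2, score)]) []
  PySem.List.sorted ranked (fun x => x.2.2) true

-- ===== PORT B =====
def rank_virality_alt (segments : List (Int × Int)) (action_segs : List (List Int)) (audio_segs : List (Int × Int)) : List (Int × Int × Int) :=
  let events := action_segs.map (fun a => (PySem.List.pyGetD a 0 0, PySem.List.pyGetD a 1 0, (2:Int)))
  let events := events ++ audio_segs.map (fun p => (p.1, p.2, (1:Int)))
  let scores := segments.map (fun _ => (0:Int))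
  let scores := events.foldl (fun scores ev =>
      (segments.zip scores).map (fun p =>
        if ev.1 < p.1.2 ∧ ev.2.1 > p.1.1 then p.2 + ev.2.2 else p.2)) scores
  let ranked := (segments.zip scores).map (fun p => (p.1.1, p.1.2, p.2))
  PySem.List.sorted ranked (fun x => x.2.2) true

-- ===== PRECONDITION & SPEC =====
-- Pre_ excludes action segments with fewer than 2 entries: A's unpack '(s, e, *_)'
-- raises ValueError on them (except when segments is empty, where A never unpacks and
-- returns []), and B's eager event-list build raises IndexError there.
def Pre_rank_virality (segments : List (Int × Int)) (action_segs : List (List Int)) (audio_segs : List (Int × Int)) : Prop :=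
  ∀ a ∈ action_segs, 2 ≤ a.length
instance (segments : List (Int × Int)) (action_segs : List (List Int)) (audio_segs : List (Int × Int)) : Decidable (Pre_rank_virality segments action_segs audio_segs) := by unfold Pre_rank_virality; infer_instance
def pvWitness_rank_virality : (List (Int × Int)) × List (List Int) × (List (Int × Int)) :=
  ([(0, 5), (4, 9)], [[0, 3], [2, 6, 1]], [(1, 2)])

def Spec_rank_virality (segments : List (Int × Int)) (action_segs : List (List Int)) (audio_segs : List (Int × Int)) (out : List (Int × Int × Int)) : Prop := out = rank_virality_alt segments action_segs audio_segs
instance (segments : List (Int × Int)) (action_segs : List (List Int)) (audio_segs : List (Int × Int)) (out : List (Int × Int × Int)) : Decidable (Spec_rank_virality segments action_segs audio_segs out) := by unfold Spec_rank_virality; infer_instance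

-- ===== CLAIM (what is proved, stated in full; the proofs are below) =====
def Claim_equal_rank_virality : Prop := ∀ (segments : List (Int × Int)) (action_segs : List (List Int)) (audio_segs : List (Int × Int)), Dom_rank_virality segments action_segs audio_segs → Pre_rank_virality segments action_segs audio_segs → Spec_rank_virality segments action_segs audio_segs (rank_virality segments action_segs audio_segs)

-- ===== LEMMAS AND PROOFS =====

-- weight contributed by one event to one segment
def pvContrib (ev : Int × Int × Int) (se : Int × Int) : Int :=
  if ev.1 < se.2 ∧ ev.2.1 > se.1 then ev.2.2 else 0

def pvTally (evs : List (Int × Int × Int)) (se : Int × Int) : Int :=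
  (evs.map (fun ev => pvContrib ev se)).sum

theorem pvTally_nil (se : Int × Int) : pvTally [] se = 0 := rfl

theorem pvTally_cons (ev : Int × Int × Int) (evs : List (Int × Int × Int)) (se : Int × Int) :
    pvTally (ev :: evs) se = pvContrib ev se + pvTally evs se := by
  simp [pvTally]

theorem pvTally_append (l₁ l₂ : List (Int × Int × Int)) (se : Int × Int) :
    pvTally (l₁ ++ l₂) se = pvTally l₁ se + pvTally l₂ se := by
  simp [pvTally]

-- zip a list with a pointwise function of itself, then map
theorem zip_map_self {α β γ : Type} (l : List α) (h : α → β) (g : α → β → γ) :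
    ((l.zip (l.map h)).map (fun p => g p.1 p.2)) = l.map (fun x => g x (h x)) := by
  induction l with
  | nil => rfl
  | cons x xs ih => simp [ih]

-- the accumulation pass over events, starting from any pointwise state
theorem foldl_events (segments : List (Int × Int)) :
    ∀ (evs : List (Int × Int × Int)) (h : Int × Int → Int),
      evs.foldl (fun scores ev =>
        (segments.zip scores).map (fun p =>
          if ev.1 < p.1.2 ∧ ev.2.1 > p.1.1 then p.2 + ev.2.2 else p.2))
        (segments.map h)
      = segments.map (fun se => h se + pvTally evs se) := by
  intro evs
  induction evs with
  | nil => intro h; simp [pvTally_nil]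
  | cons ev evs ih =>
      intro h
      have step : ((segments.zip (segments.map h)).map (fun p =>
          if ev.1 < p.1.2 ∧ ev.2.1 > p.1.1 then p.2 + ev.2.2 else p.2))
          = segments.map (fun se => h se + pvContrib ev se) := by
        rw [zip_map_self segments h (fun se sc => if ev.1 < se.2 ∧ ev.2.1 > se.1 then sc + ev.2.2 else sc)]
        apply List.map_congr_left
        intro se _
        by_cases hc : ev.1 < se.2 ∧ ev.2.1 > se.1 <;> simp [pvContrib, hc]
      simp only [List.foldl_cons, step, ih (fun se => h se + pvContrib ev se)]
      apply List.map_congr_left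
      intro se _
      rw [pvTally_cons]
      ring

-- A's counting foldl as a sum of indicators
theorem foldl_if_count {α : Type} (p : α → Prop) [DecidablePred p] :
    ∀ (l : List α) (acc : Int),
      l.foldl (fun a x => if p x then a + 1 else a) acc
      = acc + (l.map (fun x => if p x then (1:Int) else 0)).sum := by
  intro l
  induction l with
  | nil => intro acc; simp
  | cons x xs ih =>
      intro acc
      by_cases hx : p x <;> simp [hx, ih] <;> ring

-- A's appending foldl is a map
theorem foldl_append_map {α β : Type} (f : α → β) :
    ∀ (l : List α) (acc : List β),
      l.foldl (fun r x => r ++ [f x]) acc = acc ++ l.map f := by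
  intro l
  induction l with
  | nil => intro acc; simp
  | cons x xs ih => intro acc; simp [ih]

theorem sum_map_two_mul {α : Type} (l : List α) (f : α → Int) :
    (l.map (fun x => 2 * f x)).sum = 2 * (l.map f).sum := by
  induction l with
  | nil => simp
  | cons x xs ih => simp [ih]; ring

-- ===== VERDICT (by name: the statement is the Claim_ definition above) =====

theorem pvFoldlCongr {α β : Type} (l : List α) (f g : β → α → β) (init : β)
    (h : ∀ b : β, ∀ a ∈ l, f b a = g b a) : l.foldl f init = l.foldl g init := by
  induction l generalizing init with
  | nil => rfl
  | cons x xs ih =>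
      rw [List.foldl_cons, List.foldl_cons, h init x List.mem_cons_self]
      exact ih (g init x) (fun b a ha => h b a (List.mem_cons_of_mem x ha))

theorem rank_virality_spec : Claim_equal_rank_virality := by
  intro segments action_segs audio_segs _ hpre
  unfold Spec_rank_virality rank_virality rank_virality_alt
  simp only
  congr 1
  rw [foldl_append_map _ segments ([] : List (Int × Int × Int))]
  rw [foldl_events segments
      (action_segs.map (fun a => (PySem.List.pyGetD a 0 0, PySem.List.pyGetD a 1 0, (2:Int)))
        ++ audio_segs.map (fun p => (p.1, p.2, (1:Int))))
      (fun _ => 0)]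
  rw [zip_map_self segments (fun se => (0:Int) + pvTally _ se) (fun se sc => (se.1, se.2, sc))]
  simp only [List.nil_append]
  apply List.map_congr_left
  intro se _
  refine congrArg (fun z => (se.1, se.2, z)) ?_
  rw [pvTally_append]
  -- audio part
  have haud : pvTally (audio_segs.map (fun p => (p.1, p.2, (1:Int)))) se
      = audio_segs.foldl (fun acc p => if p.1 < se.2 ∧ p.2 > se.1 then acc + 1 else acc) 0 := by
    rw [foldl_if_count (fun p : Int × Int => p.1 < se.2 ∧ p.2 > se.1) audio_segs 0]
    simp [pvTally, pvContrib, List.map_map, Function.comp_def]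
  -- action part: first replace the unpacking match by its pyGetD reading (Pre_: length >= 2)
  rw [pvFoldlCongr action_segs _
      (fun acc a => if PySem.List.pyGetD a 0 0 < se.2 ∧ PySem.List.pyGetD a 1 0 > se.1 then acc + 1 else acc)
      0 ?hc]
  case hc =>
    intro b a ha
    have h2 := hpre a ha
    match a, h2 with
    | s :: e :: rest, _ =>
      have h0 : (0:Int) ≤ (rest.length : Int) + 1 := by positivity
      simp [PySem.List.pyGetD, PySem.List.pyGet?, PySem.List.pyIdx?, h0]
  have hact : pvTally (action_segs.map (fun a => (PySem.List.pyGetD a 0 0, PySem.List.pyGetD a 1 0, (2:Int)))) se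
      = (action_segs.foldl (fun acc a =>
          if PySem.List.pyGetD a 0 0 < se.2 ∧ PySem.List.pyGetD a 1 0 > se.1 then acc + 1 else acc) 0) * 2 := by
    rw [foldl_if_count (fun a : List Int => PySem.List.pyGetD a 0 0 < se.2 ∧ PySem.List.pyGetD a 1 0 > se.1) action_segs 0]
    unfold pvTally
    simp only [List.map_map, Function.comp_def]
    have key : ∀ a : List Int,
        pvContrib (PySem.List.pyGetD a 0 0, PySem.List.pyGetD a 1 0, (2:Int)) se
        = 2 * (if PySem.List.pyGetD a 0 0 < se.2 ∧ PySem.List.pyGetD a 1 0 > se.1 then (1:Int) else 0) := by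
      intro a
      by_cases hc : PySem.List.pyGetD a 0 0 < se.2 ∧ PySem.List.pyGetD a 1 0 > se.1 <;>
        simp [pvContrib, hc]
    rw [List.map_congr_left (fun a _ => key a), sum_map_two_mul]
    ring
  rw [haud, hact]
  ring
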